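-- pv_equiv track=rewrite | github.com/NadiyaSitdykova/Rearr | cc_robusness_partial_fragmentation/indel_stats.py | get_shared
-- ===== SOURCE A (Python) =====
-- def get_shared(genomes):
--     shared = {}
--     first_name = list(genomes.keys())[0]
--     for block in genomes[first_name]:
--         is_shared = True
--         for _, blocks in genomes.items():
--             if block not in blocks:
--                 is_shared = False
--                 break
--         if is_shared:
--             shared[block] = True
--     return shared
-- ===== SOURCE B (Python) =====
-- def get_shared(genomes):
--     inter = set.intersection(*(set(blocks) for blocks in genomes.values()))
--     return {block: True for block in next(iter(genomes.values())) if block in inter}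
-- ===== Notes on version B (the rewrite author's own statement) =====
-- stated objective: simpler
-- what changed: Replaces the per-block inner membership loop over every genome with one set-intersection pass over pre-built sets, then a single filtered dict comprehension over the first genome's blocks.
import Mathlib
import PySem

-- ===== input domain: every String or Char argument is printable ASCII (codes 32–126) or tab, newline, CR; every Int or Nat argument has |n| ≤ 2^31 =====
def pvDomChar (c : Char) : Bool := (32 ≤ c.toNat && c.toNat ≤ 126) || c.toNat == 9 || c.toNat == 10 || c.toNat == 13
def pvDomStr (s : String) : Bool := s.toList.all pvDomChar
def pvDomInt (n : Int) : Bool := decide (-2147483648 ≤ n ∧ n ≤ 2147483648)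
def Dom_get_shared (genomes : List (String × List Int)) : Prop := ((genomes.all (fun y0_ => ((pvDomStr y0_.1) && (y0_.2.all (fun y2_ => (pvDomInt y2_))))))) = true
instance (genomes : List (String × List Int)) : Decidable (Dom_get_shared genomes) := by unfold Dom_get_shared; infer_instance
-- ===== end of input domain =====

-- B replaces A's per-block membership scan of every genome with one set-intersection pass followed
-- by a filtered dict comprehension over the first genome's blocks (objective: simpler).
-- The dict argument is encoded as an association list in insertion order.

-- ===== PORT A =====
-- shared = {}; first_name = list(genomes.keys())[0]; for block in genomes[first_name]: ...
def get_shared (genomes : List (String × List Int)) : List (Int × Bool) :=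
  match PySem.List.pyGet? (genomes.map Prod.fst) 0 with   -- list(genomes.keys())[0]; none = IndexError (excluded by Pre_)
  | none => []
  | some first_name =>
    match (genomes.find? (fun p => p.1 == first_name)).map Prod.snd with  -- genomes[first_name]
    | none => []   -- KeyError: unreachable (first_name is a key)
    | some blocks0 =>
      (blocks0.foldl (fun shared block =>
          -- is_shared: the inner loop's final value (break changes nothing but the value)
          if genomes.all (fun kv => decide (block ∈ kv.2)) then
            PySem.Dict.insert shared block true
          else shared)
        (PySem.Dict.empty : PySem.Dict Int Bool)).items

-- ===== PORT B =====
-- inter = set.intersection(*(set(blocks) for blocks in genomes.values()));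
-- return {block: True for block in next(iter(genomes.values())) if block in inter}
def get_shared_alt (genomes : List (String × List Int)) : List (Int × Bool) :=
  match genomes with
  | [] => []    -- intersection(*()) raises TypeError (excluded by Pre_)
  | (_, bs0) :: rest =>
    let inter : PySem.Set Int :=
      rest.foldl (fun acc p => PySem.Set.inter acc (PySem.Set.ofList p.2)) (PySem.Set.ofList bs0)
    (bs0.foldl (fun d block =>
        if block ∈ inter then PySem.Dict.insert d block true else d)
      (PySem.Dict.empty : PySem.Dict Int Bool)).items

-- ===== PRECONDITION & SPEC =====
-- Pre_ excludes only the empty dict, on which A raises IndexError (and B raises TypeError).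
def Pre_get_shared (genomes : List (String × List Int)) : Prop := genomes ≠ []
instance (genomes : List (String × List Int)) : Decidable (Pre_get_shared genomes) := by unfold Pre_get_shared; infer_instance
def pvWitness_get_shared : (List (String × List Int)) := [("a", [1, 2])]

def Spec_get_shared (genomes : List (String × List Int)) (out : List (Int × Bool)) : Prop := out = get_shared_alt genomes
instance (genomes : List (String × List Int)) (out : List (Int × Bool)) : Decidable (Spec_get_shared genomes out) := by unfold Spec_get_shared; infer_instance

-- ===== CLAIM (what is proved, stated in full; the proofs are below) =====
def Claim_equal_get_shared : Prop := ∀ (genomes : List (String × List Int)), Dom_get_shared genomes → Pre_get_shared genomes → Spec_get_shared genomes (get_shared genomes)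

-- ===== LEMMAS AND PROOFS =====

-- membership in the folded intersection = membership in the seed set and in every later genome
theorem mem_foldl_inter (rest : List (String × List Int)) (s0 : PySem.Set Int) (b : Int) :
    b ∈ rest.foldl (fun acc p => PySem.Set.inter acc (PySem.Set.ofList p.2)) s0 ↔
      b ∈ s0 ∧ ∀ p ∈ rest, b ∈ p.2 := by
  induction rest generalizing s0 with
  | nil => simp
  | cons q t ih =>
    simp only [List.foldl_cons, ih, PySem.Set.mem_inter, PySem.Set.mem_ofList, List.mem_cons]
    constructor
    · rintro ⟨⟨h0, hq⟩, ht⟩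
      exact ⟨h0, fun p hp => hp.elim (fun e => e ▸ hq) (ht p)⟩
    · rintro ⟨h0, h⟩
      exact ⟨⟨h0, h q (Or.inl rfl)⟩, fun p hp => h p (Or.inr hp)⟩

-- ===== VERDICT (by name: the statement is the Claim_ definition above) =====
theorem get_shared_spec : Claim_equal_get_shared := by
  intro genomes _ hpre
  unfold Spec_get_shared
  match genomes with
  | [] => exact absurd rfl hpre
  | (k0, bs0) :: rest =>
    simp only [get_shared, get_shared_alt, List.map_cons]
    rw [show PySem.List.pyGet? (k0 :: rest.map Prod.fst) 0 = some k0 by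
          simp [PySem.List.pyGet?, PySem.List.pyIdx?]]
    simp only []
    rw [show List.find? (fun (p : String × List Int) => p.1 == k0) ((k0, bs0) :: rest)
          = some (k0, bs0) from List.find?_cons_of_pos (by simp)]
    simp only [Option.map_some]
    congr 1
    apply PySem.List.foldl_congr_mem
    intro acc b _
    by_cases h : b ∈ (rest.foldl (fun acc p => PySem.Set.inter acc (PySem.Set.ofList p.2))
        (PySem.Set.ofList bs0))
    · rw [if_pos h]
      rw [mem_foldl_inter] at h
      rw [if_pos]
      simp only [List.all_eq_true, decide_eq_true_eq]
      rintro ⟨k, bs⟩ hmem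
      rcases List.mem_cons.mp hmem with e | hm
      · cases e; exact (PySem.Set.mem_ofList bs0 b).mp h.1
      · exact h.2 _ hm
    · rw [if_neg h]
      rw [mem_foldl_inter] at h
      rw [if_neg]
      simp only [List.all_eq_true, decide_eq_true_eq]
      intro hall
      exact h ⟨(PySem.Set.mem_ofList bs0 b).mpr (hall (k0, bs0) (List.mem_cons_self)), 
               fun p hp => hall p (List.mem_cons_of_mem _ hp)⟩
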